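-- pv_equiv track=rewrite | github.com/pal1001p/ds3010_project | regression.py | normalize_feature_name
-- ===== SOURCE A (Python) =====
-- def normalize_feature_name(
--     model_feature_name: str, categorical_source_columns: list[str]
-- ) -> str:
--     """
--     Convert transformed names like 'num__Population' and
--     'cat__zip_x_06010.0' into a base source column name.
--     """
--     if model_feature_name.startswith("num__"):
--         return model_feature_name.replace("num__", "", 1)
--
--     if model_feature_name.startswith("cat__"):
--         raw = model_feature_name.replace("cat__", "", 1)
--         # One-hot names look like "<original_column>_<category_value>".
--         # Match against known source categorical columns to recover the
--         # original column name even when that name itself contains underscores.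
--         for col in sorted(categorical_source_columns, key=len, reverse=True):
--             if raw == col or raw.startswith(f"{col}_"):
--                 return col
--
--     return model_feature_name
-- ===== SOURCE B (Python) =====
-- def normalize_feature_name(
--     model_feature_name: str, categorical_source_columns: list[str]
-- ) -> str:
--     if model_feature_name.startswith("num__"):
--         return model_feature_name[5:]
--
--     if model_feature_name.startswith("cat__"):
--         raw = model_feature_name[5:]
--         best = None
--         for col in categorical_source_columns:
--             if (raw == col or raw.startswith(col + "_")) and (
--                 best is None or len(best) < len(col)
--             ):
--                 best = col
--         if best is not None:
--             return best
--
--     return model_feature_name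
-- ===== Notes on version B (the rewrite author's own statement) =====
-- stated objective: simpler
-- what changed: A sorts the categorical columns descending by length and returns the first match; B makes a single pass over the unsorted columns keeping the longest matching column seen so far (strict-greater update preserves A's first-in-original-order tie-break), and strips the 5-char prefix by slicing instead of replace(...,1).
import Mathlib
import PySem

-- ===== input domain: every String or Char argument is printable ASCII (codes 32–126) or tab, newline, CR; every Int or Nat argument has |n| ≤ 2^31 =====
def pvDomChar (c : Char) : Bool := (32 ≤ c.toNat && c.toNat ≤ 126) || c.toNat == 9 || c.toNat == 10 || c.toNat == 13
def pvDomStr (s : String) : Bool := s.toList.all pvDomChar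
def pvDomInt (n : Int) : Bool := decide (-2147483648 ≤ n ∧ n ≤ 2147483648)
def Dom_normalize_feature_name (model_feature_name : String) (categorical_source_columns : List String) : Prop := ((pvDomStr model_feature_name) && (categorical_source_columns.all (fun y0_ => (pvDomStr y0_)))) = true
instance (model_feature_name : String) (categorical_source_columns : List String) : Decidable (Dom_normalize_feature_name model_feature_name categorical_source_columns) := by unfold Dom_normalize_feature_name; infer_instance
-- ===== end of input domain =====

-- B replaces A's sort-descending-by-length-then-first-match with a single pass that keeps
-- the longest matching column seen so far, and strips the prefix by slicing: simpler, no sort.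

-- hand port of Python s.replace(old, new, 1) (PySem.Str.replace has no count argument);
-- exact: the first occurrence of old starts at Str.find s old (0 for old = ""), and exactly
-- the slice [i, i+len(old)) is replaced by new — Python's behaviour for count=1.
def pvReplaceFirst (s old new : String) : String :=
  let i := PySem.Str.find s old
  if i < 0 then s
  else String.ofList ((s.toList.take i.toNat) ++ new.toList ++ s.toList.drop (i.toNat + old.toList.length))

-- ===== PORT A =====
def normalize_feature_name (model_feature_name : String) (categorical_source_columns : List String) : String :=
  if PySem.Str.startswith model_feature_name "num__" then
    pvReplaceFirst model_feature_name "num__" ""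
  else if PySem.Str.startswith model_feature_name "cat__" then
    let raw := pvReplaceFirst model_feature_name "cat__" ""
    -- the for-loop with early return = find? over the sorted list
    match (PySem.List.sorted categorical_source_columns (fun col => PySem.Str.len col) true).find?
        (fun col => raw == col || PySem.Str.startswith raw (col ++ "_")) with
    | some col => col
    | none => model_feature_name
  else model_feature_name

-- ===== PORT B =====
def normalize_feature_name_alt (model_feature_name : String) (categorical_source_columns : List String) : String :=
  if PySem.Str.startswith model_feature_name "num__" then
    String.ofList (PySem.List.slice model_feature_name.toList (some 5) none)   -- s[5:]
  else if PySem.Str.startswith model_feature_name "cat__" then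
    let raw := String.ofList (PySem.List.slice model_feature_name.toList (some 5) none)
    -- 'best = None; for col in cols: if match and (best is None or len(best) < len(col)): best = col'
    let best := categorical_source_columns.foldl
      (fun best col =>
        if (raw == col || PySem.Str.startswith raw (col ++ "_")) &&
           (best.isNone || decide (PySem.Str.len (best.getD "") < PySem.Str.len col))
        then some col else best)
      none
    match best with
    | some col => col
    | none => model_feature_name
  else model_feature_name

-- ===== PRECONDITION & SPEC =====
def Spec_normalize_feature_name (model_feature_name : String) (categorical_source_columns : List String) (out : String) : Prop := out = normalize_feature_name_alt model_feature_name categorical_source_columns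
instance (model_feature_name : String) (categorical_source_columns : List String) (out : String) : Decidable (Spec_normalize_feature_name model_feature_name categorical_source_columns out) := by unfold Spec_normalize_feature_name; infer_instance

-- ===== CLAIM (what is proved, stated in full; the proofs are below) =====
def Claim_equal_normalize_feature_name : Prop := ∀ (model_feature_name : String) (categorical_source_columns : List String), Dom_normalize_feature_name model_feature_name categorical_source_columns → Spec_normalize_feature_name model_feature_name categorical_source_columns (normalize_feature_name model_feature_name categorical_source_columns)

-- ===== LEMMAS AND PROOFS =====

-- find returns 0 when the pattern is a prefix of a nonempty string
theorem pv_find_zero (s p : List Char) (h : p <+: s) (hs : s ≠ []) :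
    PySem.Chars.find s p = 0 := by
  cases s with
  | nil => exact absurd rfl hs
  | cons a t =>
    have : p.isPrefixOf (a :: t) = true := List.isPrefixOf_iff_prefix.mpr h
    simp [PySem.Chars.find, PySem.Chars.find.go, this]

-- replace(pre, "", 1) on a string starting with pre just drops the prefix
theorem pv_replace_prefix (s pre : String) (hpre : pre.toList ≠ [])
    (h : PySem.Str.startswith s pre = true) :
    pvReplaceFirst s pre "" = String.ofList (s.toList.drop pre.toList.length) := by
  have hpref : pre.toList <+: s.toList := by
    have := PySem.Str.startswith_eq s pre
    rw [this] at h
    exact (PySem.Chars.startswith_iff _ _).mp h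
  have hs : s.toList ≠ [] := by
    intro hnil
    rw [hnil] at hpref
    exact hpre (List.prefix_nil.mp hpref)
  have hfind : PySem.Chars.find s.toList pre.toList = 0 := pv_find_zero _ _ hpref hs
  simp [pvReplaceFirst, PySem.Str.find, hfind]

-- inserting into a descending-by-key list keeps it descending
theorem pv_insert_pairwise (k : String → Int) (x : String) (acc : List String)
    (h : acc.Pairwise (fun a b => k b ≤ k a)) :
    (PySem.List.insertBy (fun a b => decide (k b < k a)) x acc).Pairwise (fun a b => k b ≤ k a) := by
  induction acc with
  | nil => simp [PySem.List.insertBy]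
  | cons y ys ih =>
    rcases List.pairwise_cons.mp h with ⟨hy, hys⟩
    by_cases hc : k y < k x
    · simp only [PySem.List.insertBy, hc, decide_true, if_true]
      refine List.pairwise_cons.mpr ⟨?_, h⟩
      intro z hz
      rcases List.mem_cons.mp hz with rfl | hz'
      · omega
      · have := hy z hz'; omega
    · simp only [PySem.List.insertBy, hc, decide_false]
      refine List.pairwise_cons.mpr ⟨?_, ih hys⟩
      intro z hz
      rcases (PySem.List.mem_insertBy _ _ _ _).mp hz with hz | hz
      · subst hz; omega
      · exact hy z hz

-- finding the first match after a stable descending insert = one best-update step on the old find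
theorem pv_find_insertBy (p : String → Bool) (k : String → Int) (x : String) (acc : List String)
    (h : acc.Pairwise (fun a b => k b ≤ k a)) :
    (PySem.List.insertBy (fun a b => decide (k b < k a)) x acc).find? p =
      if p x then
        (match acc.find? p with
         | none => some x
         | some m => if k m < k x then some x else some m)
      else acc.find? p := by
  induction acc with
  | nil =>
    by_cases hp : p x <;> simp [PySem.List.insertBy, List.find?, hp]
  | cons y ys ih =>
    rcases List.pairwise_cons.mp h with ⟨hy, hys⟩
    by_cases hc : k y < k x
    · rw [show PySem.List.insertBy (fun a b => decide (k b < k a)) x (y :: ys) = x :: y :: ys by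
        simp [PySem.List.insertBy, hc]]
      by_cases hp : p x
      · rw [List.find?_cons_of_pos hp, if_pos hp]
        cases hm : (y :: ys).find? p with
        | none => rfl
        | some m =>
          have hmem : m ∈ y :: ys := List.mem_of_find?_eq_some hm
          have hle : k m ≤ k y := by
            rcases List.mem_cons.mp hmem with h' | h'
            · subst h'; exact le_refl _
            · exact hy m h'
          have hlt : k m < k x := lt_of_le_of_lt hle hc
          simp [hlt]
      · rw [List.find?_cons_of_neg (by simpa using hp), if_neg hp]
    · rw [show PySem.List.insertBy (fun a b => decide (k b < k a)) x (y :: ys) =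
          y :: PySem.List.insertBy (fun a b => decide (k b < k a)) x ys by
        simp [PySem.List.insertBy, hc]]
      by_cases hpy : p y
      · have hfind : (y :: ys).find? p = some y := List.find?_cons_of_pos hpy
        rw [List.find?_cons_of_pos hpy, hfind]
        by_cases hp : p x
        · simp [hp, hc]
        · simp [hp]
      · rw [List.find?_cons_of_neg hpy, List.find?_cons_of_neg hpy, ih hys]

-- the whole insertion-sort fold: first match in the sorted-desc list = first-max fold over the matches
theorem pv_find_foldl (p : String → Bool) (k : String → Int) (cols : List String) :
    ∀ acc : List String, acc.Pairwise (fun a b => k b ≤ k a) →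
    (cols.foldl (fun acc x => PySem.List.insertBy (fun a b => decide (k b < k a)) x acc) acc).find? p =
      (cols.filter p).foldl
        (fun acc x => match acc with
          | none => some x
          | some m => if k m < k x then some x else some m)
        (acc.find? p) := by
  induction cols with
  | nil => intro acc _; simp
  | cons x xs ih =>
    intro acc hacc
    simp only [List.foldl_cons]
    rw [ih _ (pv_insert_pairwise k x acc hacc), pv_find_insertBy p k x acc hacc]
    by_cases hp : p x
    · simp [hp]
    · simp [hp]

-- B's guarded single-pass fold = the first-max fold over the filtered matches
theorem pv_best_eq_filter_fold (p : String → Bool) (k : String → Int) (cols : List String) :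
    ∀ acc : Option String,
    cols.foldl
      (fun best col =>
        if p col && (best.isNone || decide (k (best.getD "") < k col)) then some col else best)
      acc =
    (cols.filter p).foldl
      (fun acc x => match acc with
        | none => some x
        | some m => if k m < k x then some x else some m)
      acc := by
  induction cols with
  | nil => intro acc; simp
  | cons x xs ih =>
    intro acc
    by_cases hp : p x
    · rw [List.filter_cons_of_pos hp]
      simp only [List.foldl_cons]
      rw [← ih]
      congr 1
      cases acc with
      | none => simp [hp]
      | some m =>
        by_cases hlt : k m < k x
        · simp [hp, hlt]
        · simp [hp, hlt]
    · rw [List.filter_cons_of_neg hp]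
      simp only [List.foldl_cons]
      rw [if_neg (by simp [hp]), ih]

-- A's find?-over-sorted equals B's single-pass best fold
theorem pv_find_sorted_eq_best (p : String → Bool) (k : String → Int) (cols : List String) :
    (PySem.List.sorted cols k true).find? p =
      cols.foldl
        (fun best col =>
          if p col && (best.isNone || decide (k (best.getD "") < k col)) then some col else best)
        none := by
  rw [PySem.List.sorted_rev_eq_foldl_insertBy]
  have h := pv_find_foldl p k cols [] List.Pairwise.nil
  rw [List.find?_nil] at h
  rw [h, pv_best_eq_filter_fold]

-- ===== VERDICT (by name: the statement is the Claim_ definition above) =====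
theorem normalize_feature_name_spec : Claim_equal_normalize_feature_name := by
  intro mfn cols _
  unfold Spec_normalize_feature_name normalize_feature_name normalize_feature_name_alt
  have hslice : String.ofList (PySem.List.slice mfn.toList (some 5) none) =
      String.ofList (mfn.toList.drop 5) := by
    have := PySem.List.slice_from_natCast mfn.toList 5
    simp only [Nat.cast_ofNat] at this
    rw [this]
  by_cases h1 : PySem.Str.startswith mfn "num__"
  · rw [if_pos h1, if_pos h1, pv_replace_prefix mfn "num__" (by decide) h1, hslice,
      show ("num__".toList.length) = 5 from rfl]
  · by_cases h2 : PySem.Str.startswith mfn "cat__"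
    · rw [if_neg h1, if_neg h1, if_pos h2, if_pos h2,
        pv_replace_prefix mfn "cat__" (by decide) h2, hslice,
        show ("cat__".toList.length) = 5 from rfl]
      simp only [pv_find_sorted_eq_best]
    · rw [if_neg h1, if_neg h1, if_neg h2, if_neg h2]
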